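-- pv_equiv track=rewrite | github.com/adaasch/fanju_decoder_arduino_pi | pi/fanju_433.py | markup
-- ===== SOURCE A (Python) =====
-- def markup(bits, msg_length, base=2):
--     """Print the received data as binary nibbles."""
--     text = ''
--     s = 0
--     e = 4
--     nsum = 0
--     width = 5
--     nnib = 0
--     if len(bits) >= msg_length:
--         while e <= msg_length:
--             nnib += 1
--             nibble = ''.join(bits[s:e])
--             nnum = int(nibble, 2)
--
--             # exclude the third nibble (the assumed checksum) from checks
--             if nnib != 3:
--                 nsum += nnum
--
--             if base == 16:
--                 text += hex(nnum).ljust(width, ' ')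
--             elif base == 10:
--                 text += str(nnum).ljust(width, ' ')
--             else:
--                 text += nibble.ljust(width, ' ')
--             s += 4
--             e += 4
--     if base == 16:
--         text += ' ' + hex(nsum)
--     elif base == 10:
--         text += ' ' + str(nsum)
--     else:
--         text += ' ' + bin(nsum)
--     return text
-- ===== SOURCE B (Python) =====
-- def markup(bits, msg_length, base=2):
--     """Print the received data as binary nibbles."""
--     n = msg_length // 4 if len(bits) >= msg_length else 0
--     nibs = [''.join(g) for g in zip(*[iter(bits)] * 4)][:max(n, 0)]
--     nums = [int(nb, 2) for nb in nibs]
--     nsum = sum(nums) - (nums[2] if len(nums) > 2 else 0)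
--     if base == 16:
--         cells, tail = [hex(v) for v in nums], hex(nsum)
--     elif base == 10:
--         cells, tail = [str(v) for v in nums], str(nsum)
--     else:
--         cells, tail = nibs, bin(nsum)
--     return ''.join('%-5s' % c for c in cells) + ' ' + tail
-- ===== Notes on version B (the rewrite author's own statement) =====
-- stated objective: alternative
-- what changed: A's single while-loop with running counters (s, e, nnib, nsum, text) that interleaves slicing, parsing, a conditional checksum skip and formatted concatenation is replaced by: grouping the list into quadruples with the zip(*[iter(bits)]*4) transposition idiom and truncating to msg_length//4, computing the checksum as total sum minus the third value (instead of skipping it while accumulating), and rendering cells via %-5s printf-style formatting joined at the end.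
import Mathlib
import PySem

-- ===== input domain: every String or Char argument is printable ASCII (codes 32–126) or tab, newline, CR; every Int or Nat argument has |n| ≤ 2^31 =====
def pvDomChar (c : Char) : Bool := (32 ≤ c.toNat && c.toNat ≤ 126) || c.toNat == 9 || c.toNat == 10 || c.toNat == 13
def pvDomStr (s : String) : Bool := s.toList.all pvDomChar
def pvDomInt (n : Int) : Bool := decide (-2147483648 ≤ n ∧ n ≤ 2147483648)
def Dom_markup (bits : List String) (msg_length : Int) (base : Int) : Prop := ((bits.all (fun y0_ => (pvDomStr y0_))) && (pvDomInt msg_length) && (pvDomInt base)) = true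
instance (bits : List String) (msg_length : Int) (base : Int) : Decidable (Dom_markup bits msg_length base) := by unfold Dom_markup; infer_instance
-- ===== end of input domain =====

-- B replaces A's single stateful while-loop by a staged pipeline: quadruple grouping of the
-- whole list (the zip-iterator idiom) truncated to msg_length//4, checksum as total sum minus
-- the third value, printf-style '%-5s' cells joined at the end; objective: alternative (no speed claim).

-- shared ports of Python builtins (both Pythons call the same builtins):
-- str.ljust(w, ' ') and '%-5s' % c — exact: pad on the right with spaces up to width w
def pyLjust (cs : List Char) (w : Nat) : List Char := cs ++ List.replicate (w - cs.length) ' '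

-- hex(n) — exact: '0x' + lowercase hex digits, '-0x…' for negatives ('0x0' for 0)
def pyHexChars (n : Int) : List Char :=
  if n < 0 then '-' :: '0' :: 'x' :: Nat.toDigits 16 (-n).toNat
  else '0' :: 'x' :: Nat.toDigits 16 n.toNat

-- int(cs, 2); the default 0 is never used on inputs admitted by Pre_markup (parse succeeds there)
def parseBin (cs : List Char) : Int := (PySem.Int.ofCharsBase? cs 2).getD 0

-- ===== PORT A =====
-- the while-loop of A, state (s, e, nnib, nsum, text) exactly as in the Python
def markupLoop (bits : List String) (msg_length base : Int)
    (s e nnib nsum : Int) (text : List Char) : List Char × Int :=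
  if h : e ≤ msg_length then
    -- nibble = ''.join(bits[s:e])  (''.join = concatenation)
    let nibble : List Char := ((PySem.List.slice bits (some s) (some e)).map String.toList).flatten
    let nnum : Int := parseBin nibble
    let nnib' := nnib + 1
    let nsum' := if nnib' ≠ 3 then nsum + nnum else nsum
    let text' := text ++
      (if base = 16 then pyLjust (pyHexChars nnum) 5
       else if base = 10 then pyLjust (PySem.Int.toChars nnum) 5
       else pyLjust nibble 5)
    markupLoop bits msg_length base (s + 4) (e + 4) nnib' nsum' text'
  else (text, nsum)
termination_by (msg_length - e + 4).toNat
decreasing_by omega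

def markup (bits : List String) (msg_length : Int) (base : Int) : String :=
  let r : List Char × Int :=
    if msg_length ≤ PySem.List.len bits then
      markupLoop bits msg_length base 0 4 0 0 []
    else ([], 0)
  String.ofList (r.1 ++
    (if base = 16 then ' ' :: pyHexChars r.2
     else if base = 10 then ' ' :: PySem.Int.toChars r.2
     else ' ' :: PySem.Int.toBinChars0b r.2))

-- ===== PORT B =====
-- zip(*[iter(bits)] * 4): successive quadruples, dropping an incomplete trailing group (hand port, exact)
def groups4 : List String → List (List String)
  | a :: b :: c :: d :: rest => [a, b, c, d] :: groups4 rest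
  | _ => []

-- ''.join(g)
def gjoin (g : List String) : List Char := (g.map String.toList).flatten

def markup_alt (bits : List String) (msg_length : Int) (base : Int) : String :=
  -- n = msg_length // 4 if len(bits) >= msg_length else 0
  let n : Int := if msg_length ≤ PySem.List.len bits then PySem.Int.floordiv msg_length 4 else 0
  -- nibs = [''.join(g) for g in zip(*[iter(bits)] * 4)][:max(n, 0)]
  let nibs : List (List Char) := PySem.List.slice ((groups4 bits).map gjoin) none (some (max n 0))
  let nums : List Int := nibs.map parseBin
  -- nsum = sum(nums) - (nums[2] if len(nums) > 2 else 0); nums[2] exists under the guard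
  let nsum : Int := nums.foldl (· + ·) 0 -
    (if 2 < PySem.List.len nums then (PySem.List.pyGet? nums 2).getD 0 else 0)
  let ct : List (List Char) × List Char :=
    if base = 16 then (nums.map pyHexChars, pyHexChars nsum)
    else if base = 10 then (nums.map PySem.Int.toChars, PySem.Int.toChars nsum)
    else (nibs, PySem.Int.toBinChars0b nsum)
  -- ''.join('%-5s' % c for c in cells) + ' ' + tail
  String.ofList ((ct.1.map (fun c => pyLjust c 5)).flatten ++ ' ' :: ct.2)

-- ===== PRECONDITION & SPEC =====
-- ''.join(bits[4*i : 4*i+4]) — the i-th nibble A parses (used only to state Pre_)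
def nibChunk (bits : List String) (i : Int) : List Char :=
  ((PySem.List.slice bits (some (4 * i)) (some (4 * i + 4))).map String.toList).flatten

-- Pre_ excludes exactly the inputs where A raises: a ValueError from int(nibble, 2) on a chunk
-- that is not a valid binary literal (only reached when len(bits) >= msg_length).
def Pre_markup (bits : List String) (msg_length : Int) (base : Int) : Prop :=
  msg_length ≤ (bits.length : Int) →
    ∀ i ∈ PySem.List.pyRange 0 (PySem.Int.floordiv msg_length 4) 1,
      (PySem.Int.ofCharsBase? (nibChunk bits i) 2).isSome
instance (bits : List String) (msg_length : Int) (base : Int) : Decidable (Pre_markup bits msg_length base) := by unfold Pre_markup; infer_instance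

def pvWitness_markup : List String × Int × Int := (["1", "0", "1", "0"], 4, 2)

def Spec_markup (bits : List String) (msg_length : Int) (base : Int) (out : String) : Prop := out = markup_alt bits msg_length base
instance (bits : List String) (msg_length : Int) (base : Int) (out : String) : Decidable (Spec_markup bits msg_length base out) := by unfold Spec_markup; infer_instance

-- ===== CLAIM (what is proved, stated in full; the proofs are below) =====
def Claim_equal_markup : Prop := ∀ (bits : List String) (msg_length : Int) (base : Int), Dom_markup bits msg_length base → Pre_markup bits msg_length base → Spec_markup bits msg_length base (markup bits msg_length base)

-- ===== LEMMAS AND PROOFS =====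

-- what one loop iteration of A appends for chunk index i (A's three format branches)
def fmtChunk (bits : List String) (base : Int) (i : Int) : List Char :=
  if base = 16 then pyLjust (pyHexChars (parseBin (nibChunk bits i))) 5
  else if base = 10 then pyLjust (PySem.Int.toChars (parseBin (nibChunk bits i))) 5
  else pyLjust (nibChunk bits i) 5

lemma le_floordiv_four (a j : Int) : (j + 1 ≤ PySem.Int.floordiv a 4) ↔ 4 * (j + 1) ≤ a := by
  rw [PySem.Int.floordiv, Int.fdiv_eq_ediv]; simp; omega

-- A's loop from chunk index j onwards equals a map/fold over the remaining index range
lemma loop_eq (bits : List String) (m base : Int) :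
    ∀ (n : Nat) (j nsum : Int) (text : List Char),
      (PySem.Int.floordiv m 4 - j).toNat = n →
      markupLoop bits m base (4 * j) (4 * j + 4) j nsum text =
        (text ++ ((PySem.List.pyRange j (PySem.Int.floordiv m 4) 1).map (fmtChunk bits base)).flatten,
         (PySem.List.pyRange j (PySem.Int.floordiv m 4) 1).foldl
           (fun a i => if i ≠ 2 then a + parseBin (nibChunk bits i) else a) nsum) := by
  intro n
  induction n with
  | zero =>
    intro j nsum text hn
    have hk : PySem.Int.floordiv m 4 ≤ j := by omega
    have hcond : ¬ (4 * j + 4 ≤ m) := by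
      intro h; have := (le_floordiv_four m j).mpr (by omega); omega
    rw [markupLoop, dif_neg hcond, PySem.List.pyRange_one_eq_nil hk]
    simp
  | succ n ih =>
    intro j nsum text hn
    have hjk : j < PySem.Int.floordiv m 4 := by omega
    have hcond : 4 * j + 4 ≤ m := by
      have := (le_floordiv_four m j).mp (by omega); omega
    rw [markupLoop, dif_pos hcond]
    have hnib : ((PySem.List.slice bits (some (4 * j)) (some (4 * j + 4))).map String.toList).flatten
        = nibChunk bits j := rfl
    simp only [hnib]
    have hs : 4 * j + 4 = 4 * (j + 1) := by ring
    rw [hs, ih (j + 1) _ _ (by omega)]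
    rw [PySem.List.pyRange_one_cons hjk]
    have hif : (if j + 1 ≠ 3 then nsum + parseBin (nibChunk bits j) else nsum)
        = (if j ≠ 2 then nsum + parseBin (nibChunk bits j) else nsum) := by
      by_cases h : j = 2 <;> simp [h] <;> omega
    simp [fmtChunk, hif]

-- B's quadruple grouping peels off the first four elements of a long-enough list
lemma groups4_cons_of_le (l : List String) (h : 4 ≤ l.length) :
    groups4 l = l.take 4 :: groups4 (l.drop 4) := by
  match l with
  | [] => simp at h
  | [a] => simp at h
  | [a, b] => simp at h
  | [a, b, c] => simp at h
  | a :: b :: c :: d :: rest => rfl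

-- the i-th nibble is the i-th quadruple (Nat index form)
lemma nibChunk_eq_take (bits : List String) (j : Nat) :
    nibChunk bits ((j : Nat) : Int) = gjoin ((bits.drop (4 * j)).take 4) := by
  unfold nibChunk gjoin
  have h2 : (4 : Int) * (j : Int) + 4 = ((4 * j + 4 : Nat) : Int) := by push_cast; ring
  have h1 : (4 : Int) * (j : Int) = ((4 * j : Nat) : Int) := by push_cast; ring
  rw [h2, h1, PySem.List.slice_natCast]
  have h3 : 4 * j + 4 - 4 * j = 4 := by omega
  rw [h3]

-- B's truncated grouping equals the range of A's nibbles
lemma groups4_take (bits : List String) :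
    ∀ (k j : Nat), 4 * j + 4 * k ≤ bits.length →
      (((groups4 (bits.drop (4 * j))).map gjoin).take k
        = (PySem.List.pyRange (j : Int) ((j : Int) + (k : Int)) 1).map (nibChunk bits)) := by
  intro k
  induction k with
  | zero =>
    intro j _
    rw [PySem.List.pyRange_one_eq_nil (by omega)]
    simp
  | succ k ih =>
    intro j hlen
    have hlen4 : 4 ≤ (bits.drop (4 * j)).length := by rw [List.length_drop]; omega
    have hih := ih (j + 1) (by omega)
    have hc1 : ((j + 1 : Nat) : Int) = (j : Int) + 1 := by push_cast; ring
    rw [hc1] at hih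
    have hb : (j : Int) + 1 + (k : Int) = (j : Int) + ((k + 1 : Nat) : Int) := by push_cast; ring
    rw [hb] at hih
    have hdd : (bits.drop (4 * j)).drop 4 = bits.drop (4 * (j + 1)) := by
      rw [List.drop_drop]; congr 1
    rw [groups4_cons_of_le _ hlen4, List.map_cons, List.take_succ_cons, hdd, hih,
      show PySem.List.pyRange (j : Int) ((j : Int) + ((k + 1 : Nat) : Int)) 1
          = (j : Int) :: PySem.List.pyRange ((j : Int) + 1) ((j : Int) + ((k + 1 : Nat) : Int)) 1
        from PySem.List.pyRange_one_cons (by push_cast; omega),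
      List.map_cons, nibChunk_eq_take]

-- the skip-index-2 accumulation is the full sum minus the value at 2 (when the range reaches it)
lemma skip2_fold (v : Int → Int) :
    ∀ (n : Nat),
      (PySem.List.pyRange 0 (n : Int) 1).foldl (fun a i => if i ≠ 2 then a + v i else a) 0
        = (PySem.List.pyRange 0 (n : Int) 1).foldl (fun a i => a + v i) 0
          - (if 2 < (n : Int) then v 2 else 0) := by
  intro n
  induction n with
  | zero => simp [PySem.List.pyRange_one_eq_nil]
  | succ n ih =>
    push_cast
    rw [PySem.List.pyRange_one_succ_right (by positivity), List.foldl_append, List.foldl_append,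
      List.foldl_cons, List.foldl_cons, List.foldl_nil, List.foldl_nil]
    by_cases h2 : (n : Int) = 2
    · push_cast at ih
      rw [ih]
      simp [h2]
    · have hiff : (2 < (n : Int) + 1) ↔ (2 < (n : Int)) := by
        constructor <;> intro h <;> omega
      push_cast at ih
      rw [ih]
      simp only [h2, if_pos, ne_eq, not_false_iff]
      by_cases h3 : 2 < (n : Int) <;> simp [h3, hiff] <;> ring
  
-- ===== VERDICT (by name: the statement is the Claim_ definition above) =====
theorem markup_spec : Claim_equal_markup := by
  intro bits m base _hdom _hpre
  unfold Spec_markup markup markup_alt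
  by_cases hg : m ≤ PySem.List.len bits
  · rw [if_pos hg, if_pos hg]
    set N := PySem.Int.floordiv m 4 with hN
    have h0 : markupLoop bits m base 0 4 0 0 [] =
        markupLoop bits m base (4 * 0) (4 * 0 + 4) 0 0 [] := by norm_num
    rw [h0, loop_eq bits m base (N - 0).toNat 0 0 [] rfl]
    by_cases hNpos : 0 < N
    · -- positive nibble count: B's truncated grouping = A's chunk range
      have h4N : 4 * N ≤ m := by
        have := (le_floordiv_four m (N - 1)).mp (by omega); omega
      have hmlen : m ≤ (bits.length : Int) := by simpa [PySem.List.len_eq] using hg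
      have hmax : max N 0 = N := by omega
      have hslice : PySem.List.slice ((groups4 bits).map gjoin) none (some (max N 0))
          = (PySem.List.pyRange 0 N 1).map (nibChunk bits) := by
        rw [hmax, PySem.List.slice_to _ (by omega)]
        have hNc : ((N.toNat : Nat) : Int) = N := by omega
        have := groups4_take bits N.toNat 0 (by omega)
        simp only [Nat.cast_zero, mul_zero, List.drop_zero, zero_add, hNc] at this
        exact this
      simp only [hslice]
      -- nsum: skip-2 fold = sum minus third
      have hnums : ((PySem.List.pyRange 0 N 1).map (nibChunk bits)).map parseBin
          = (PySem.List.pyRange 0 N 1).map (fun i => parseBin (nibChunk bits i)) := by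
        rw [List.map_map]; rfl
      have hNc : ((N.toNat : Nat) : Int) = N := by omega
      have hskip := skip2_fold (fun i => parseBin (nibChunk bits i)) N.toNat
      rw [hNc] at hskip
      have hlen : PySem.List.len (((PySem.List.pyRange 0 N 1).map (nibChunk bits)).map parseBin) = N := by
        simp [PySem.List.len_eq, PySem.List.length_pyRange_one]; omega
      have hsum : (((PySem.List.pyRange 0 N 1).map (nibChunk bits)).map parseBin).foldl (· + ·) 0
          = (PySem.List.pyRange 0 N 1).foldl (fun a i => a + parseBin (nibChunk bits i)) 0 := by
        rw [hnums, List.foldl_map]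
      have hguard : (if 2 < PySem.List.len (((PySem.List.pyRange 0 N 1).map (nibChunk bits)).map parseBin)
            then (PySem.List.pyGet? (((PySem.List.pyRange 0 N 1).map (nibChunk bits)).map parseBin) 2).getD 0
            else 0) = (if 2 < N then parseBin (nibChunk bits 2) else 0) := by
        rw [hlen]
        by_cases h : 2 < N
        · rw [if_pos h, if_pos h, hnums,
            show (2 : Int) = ((2 : Nat) : Int) from by norm_num,
            PySem.List.pyGet?_natCast,
            show N = ((N.toNat : Nat) : Int) from by omega,
            PySem.List.getElem?_map_pyRange_zero _ _ _ (by omega : (2 : Nat) < N.toNat)]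
          simp
        · rw [if_neg h, if_neg h]
      have hnsum : (PySem.List.pyRange 0 N 1).foldl
            (fun a i => if i ≠ 2 then a + parseBin (nibChunk bits i) else a) 0
          = (((PySem.List.pyRange 0 N 1).map (nibChunk bits)).map parseBin).foldl (· + ·) 0
            - (if 2 < PySem.List.len (((PySem.List.pyRange 0 N 1).map (nibChunk bits)).map parseBin)
               then (PySem.List.pyGet? (((PySem.List.pyRange 0 N 1).map (nibChunk bits)).map parseBin) 2).getD 0 else 0) := by
        rw [hguard, hsum, hskip]
      rw [hnsum]
      -- formatting: each branch's cells are the fmtChunk map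
      split_ifs with h16 h10 <;>
        simp only [List.map_map] <;>
        exact congrArg String.ofList (congrArg₂ (· ++ ·)
          (congrArg List.flatten (List.map_congr_left fun i _ => by
            simp [fmtChunk, Function.comp_def, *])) rfl)
    · -- N ≤ 0: no nibbles on either side
      have hmax : max N 0 = 0 := by omega
      rw [PySem.List.pyRange_one_eq_nil (by omega : N ≤ (0:Int))]
      dsimp only
      rw [hmax, PySem.List.slice_to _ le_rfl]
      split_ifs <;> simp_all [PySem.List.len_eq]
  · rw [if_neg hg, if_neg hg]
    dsimp only
    rw [PySem.List.slice_to _ (by omega : (0:Int) ≤ max 0 0)]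
    split_ifs <;> simp_all [PySem.List.len_eq]
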